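-- pv_equiv track=rewrite | github.com/ZepseWolf/CSC2004-Team-Project | png/body.py | detect_color_to_start
-- ===== SOURCE A (Python) =====
-- def detect_color_to_start(length_remainder_bits, lsb_bit_selected):
-- 	counter = -1
-- 	'''
-- 	(0:R, 1:G. 2:B)
-- 	'''
-- 	for color in range(0, 3, 1):
-- 		for bit in range(lsb_bit_selected, -1, -1):
-- 			counter += 1
-- 			if counter == length_remainder_bits:
-- 				# Returns starting position to write
-- 				return color, bit
-- ===== SOURCE B (Python) =====
-- def detect_color_to_start(length_remainder_bits, lsb_bit_selected):
--     # Closed-form mixed-radix computation instead of the double loop.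
--     width = lsb_bit_selected + 1
--     if lsb_bit_selected < 0 or length_remainder_bits < 0 or length_remainder_bits >= 3 * width:
--         return None
--     color, j = divmod(length_remainder_bits, width)
--     return color, lsb_bit_selected - j
-- ===== Notes on version B (the rewrite author's own statement) =====
-- stated objective: simpler
-- what changed: Replaced the nested counting loops over colors and bit positions by a closed-form divmod on width = lsb_bit_selected + 1, with an explicit range guard for the cases where the loops fall through and return None.
import Mathlib
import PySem

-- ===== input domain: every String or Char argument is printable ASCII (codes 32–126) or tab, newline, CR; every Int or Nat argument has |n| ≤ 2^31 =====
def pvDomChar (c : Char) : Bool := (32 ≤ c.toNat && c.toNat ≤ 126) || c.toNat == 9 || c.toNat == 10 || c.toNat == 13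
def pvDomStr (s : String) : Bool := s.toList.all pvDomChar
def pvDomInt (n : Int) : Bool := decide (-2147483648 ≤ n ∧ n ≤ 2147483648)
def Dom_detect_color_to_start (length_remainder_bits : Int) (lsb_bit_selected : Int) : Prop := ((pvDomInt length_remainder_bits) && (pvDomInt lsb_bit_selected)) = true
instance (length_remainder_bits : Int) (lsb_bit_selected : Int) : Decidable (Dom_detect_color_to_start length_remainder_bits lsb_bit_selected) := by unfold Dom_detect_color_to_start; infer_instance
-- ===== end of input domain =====

-- B replaces A's nested counting loops by a closed-form divmod on width = lsb_bit_selected + 1 (simpler, O(1)).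


-- ===== PORT A =====
-- one step of the inner loop body (counter += 1; if counter == length: return color, bit)
def pvStepA (length_remainder_bits color : Int) (st : Option (Int × Int) × Int) (bit : Int) :
    Option (Int × Int) × Int :=
  match st.1 with
  | some r => (some r, st.2)
  | none =>
    let counter := st.2 + 1
    if counter = length_remainder_bits then (some (color, bit), counter) else (none, counter)

def detect_color_to_start (length_remainder_bits : Int) (lsb_bit_selected : Int) : Option (Int × Int) :=
  ((PySem.List.pyRange 0 3 1).foldl
    (fun st color =>
      (PySem.List.pyRange lsb_bit_selected (-1) (-1)).foldl
        (pvStepA length_remainder_bits color) st)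
    ((none : Option (Int × Int)), (-1 : Int))).1

-- ===== PORT B =====
def detect_color_to_start_alt (length_remainder_bits : Int) (lsb_bit_selected : Int) : Option (Int × Int) :=
  let width := lsb_bit_selected + 1
  if lsb_bit_selected < 0 ∨ length_remainder_bits < 0 ∨ 3 * width ≤ length_remainder_bits then
    none
  else
    some (PySem.Int.floordiv length_remainder_bits width,
          lsb_bit_selected - PySem.Int.mod length_remainder_bits width)

-- ===== PRECONDITION & SPEC =====
def Spec_detect_color_to_start (length_remainder_bits : Int) (lsb_bit_selected : Int) (out : Option (Int × Int)) : Prop := out = detect_color_to_start_alt length_remainder_bits lsb_bit_selected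
instance (length_remainder_bits : Int) (lsb_bit_selected : Int) (out : Option (Int × Int)) : Decidable (Spec_detect_color_to_start length_remainder_bits lsb_bit_selected out) := by unfold Spec_detect_color_to_start; infer_instance

-- ===== CLAIM (what is proved, stated in full; the proofs are below) =====
def Claim_equal_detect_color_to_start : Prop := ∀ (length_remainder_bits : Int) (lsb_bit_selected : Int), Dom_detect_color_to_start length_remainder_bits lsb_bit_selected → Spec_detect_color_to_start length_remainder_bits lsb_bit_selected (detect_color_to_start length_remainder_bits lsb_bit_selected)

-- ===== LEMMAS AND PROOFS =====

-- a found result is carried through unchanged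
theorem pvStepA_some (L color : Int) (l : List Int) (r : Int × Int) (c : Int) :
    l.foldl (pvStepA L color) (some r, c) = (some r, c) := by
  induction l generalizing c with
  | nil => rfl
  | cons b t ih => simpa [pvStepA] using ih c

-- the inner countdown loop starting not-found with counter c, over bits n, n-1, …, 0
theorem pvInner (L color : Int) (n : Nat) : ∀ c : Int,
    (PySem.List.pyRange (n : Int) (-1) (-1)).foldl (pvStepA L color) (none, c) =
      if c < L ∧ L ≤ c + n + 1 then (some (color, (n : Int) - (L - c - 1)), L)
      else (none, c + n + 1) := by
  induction n with
  | zero =>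
    intro c
    rw [PySem.List.pyRange_neg_one_cons (by norm_num), PySem.List.pyRange_neg_one_eq_nil (by norm_num)]
    simp only [List.foldl_cons, List.foldl_nil, pvStepA, Nat.cast_zero]
    split_ifs with h1 h2 h2 <;>
      simp only [Prod.mk.injEq, Option.some.injEq, reduceCtorEq, true_and, false_and] <;> omega
  | succ n ih =>
    intro c
    rw [PySem.List.pyRange_neg_one_cons (by push_cast; omega)]
    have hcast : ((n + 1 : Nat) : Int) - 1 = (n : Int) := by push_cast; ring
    by_cases h : c + 1 = L
    · simp only [List.foldl_cons, pvStepA]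
      rw [if_pos h, hcast, pvStepA_some]
      rw [if_pos (show c < L ∧ L ≤ c + ((n + 1 : Nat) : Int) + 1 by push_cast; omega)]
      simp only [Prod.mk.injEq, Option.some.injEq, true_and]
      constructor
      · push_cast; omega
      · omega
    · simp only [List.foldl_cons, pvStepA]
      rw [if_neg h, hcast, ih (c + 1)]
      by_cases h2 : c + 1 < L ∧ L ≤ c + 1 + (n : Int) + 1
      · rw [if_pos h2, if_pos (show c < L ∧ L ≤ c + ((n + 1 : Nat) : Int) + 1 by push_cast; omega)]
        simp only [Prod.mk.injEq, Option.some.injEq, true_and, and_true]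
        push_cast; omega
      · rw [if_neg h2, if_neg (show ¬(c < L ∧ L ≤ c + ((n + 1 : Nat) : Int) + 1) by push_cast at h2 ⊢; omega)]
        simp only [Prod.mk.injEq, true_and, and_true]
        push_cast; omega

-- divmod characterisation: for 0 < w, 0 ≤ r < w, a = w*q + r determines floordiv and mod
theorem pvDivmod (a w q r : Int) (hw : 0 < w) (hr0 : 0 ≤ r) (hrw : r < w) (h : a = w * q + r) :
    PySem.Int.floordiv a w = q ∧ PySem.Int.mod a w = r := by
  rw [PySem.Int.floordiv_eq_ediv_of_pos hw, PySem.Int.mod_eq_emod_of_pos hw, h]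
  constructor
  · rw [show w * q + r = r + w * q by ring, Int.add_mul_ediv_left _ _ (by omega),
        Int.ediv_eq_zero_of_lt hr0 hrw]
    omega
  · rw [show w * q + r = r + w * q by ring, Int.add_mul_emod_self_left,
        Int.emod_eq_of_lt hr0 hrw]

theorem pvMain (L s : Int) :
    detect_color_to_start L s = detect_color_to_start_alt L s := by
  by_cases hs : s < 0
  · -- inner range empty: counter never increments, loop falls through → None
    unfold detect_color_to_start detect_color_to_start_alt
    rw [PySem.List.pyRange_neg_one_eq_nil (by omega)]
    simp only [List.foldl_nil]
    rw [show PySem.List.pyRange 0 3 1 = [0, 1, 2] from by decide]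
    simp only [List.foldl_cons, List.foldl_nil]
    rw [if_pos (Or.inl hs)]
  · -- s = (n : Nat)
    rw [Int.not_lt] at hs
    obtain ⟨n, rfl⟩ := Int.eq_ofNat_of_zero_le hs
    unfold detect_color_to_start
    have h3 : PySem.List.pyRange 0 3 1 = [0, 1, 2] := by decide
    rw [h3]
    simp only [List.foldl_cons, List.foldl_nil]
    by_cases c0 : (0 : Int) ≤ L ∧ L ≤ (n : Int)
    · -- found in color 0
      rw [pvInner, if_pos (by omega), pvStepA_some, pvStepA_some]
      unfold detect_color_to_start_alt
      rw [if_neg (by push_cast; omega)]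
      obtain ⟨hd, hm⟩ := pvDivmod L ((n : Int) + 1) 0 L (by omega) (by omega) (by omega) (by ring)
      rw [hd, hm]
      simp only [Prod.mk.injEq, Option.some.injEq, true_and]
      omega
    · rw [pvInner, if_neg (by omega)]
      by_cases c1 : (n : Int) < L ∧ L ≤ 2 * (n : Int) + 1
      · -- found in color 1
        rw [pvInner, if_pos (by omega), pvStepA_some]
        unfold detect_color_to_start_alt
        rw [if_neg (by push_cast; omega)]
        obtain ⟨hd, hm⟩ := pvDivmod L ((n : Int) + 1) 1 (L - (n : Int) - 1)
          (by omega) (by omega) (by omega) (by ring)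
        rw [hd, hm]
        simp only [Prod.mk.injEq, Option.some.injEq, true_and]
        omega
      · rw [pvInner, if_neg (by omega)]
        by_cases c2 : 2 * (n : Int) + 1 < L ∧ L ≤ 3 * (n : Int) + 2
        · -- found in color 2
          rw [pvInner, if_pos (by omega)]
          unfold detect_color_to_start_alt
          rw [if_neg (by push_cast; omega)]
          obtain ⟨hd, hm⟩ := pvDivmod L ((n : Int) + 1) 2 (L - 2 * (n : Int) - 2)
            (by omega) (by omega) (by omega) (by ring)
          rw [hd, hm]
          simp only [Prod.mk.injEq, Option.some.injEq, true_and]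
          omega
        · -- out of range → None on both sides
          rw [pvInner, if_neg (by omega)]
          unfold detect_color_to_start_alt
          rw [if_pos (by push_cast; omega)]

-- ===== VERDICT (by name: the statement is the Claim_ definition above) =====
theorem detect_color_to_start_spec : Claim_equal_detect_color_to_start := by
  intro L s _
  unfold Spec_detect_color_to_start
  exact pvMain L s
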